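-- pv_equiv track=rewrite | github.com/johanwasserman/span | python/league_ranking.py | format_standings
-- ===== SOURCE A (Python) =====
-- from typing import List, Tuple, Dict
--
-- def format_standings(sorted_standings: List[Tuple[str, int]]) -> str:
--     """Format the standings for output."""
--     output = []
--     rank = 1
--     prev_points = None
--     for i, (team, points) in enumerate(sorted_standings):
--         if points != prev_points:
--             rank = i + 1
--         prev_points = points
--         output.append(f"{rank}. {team}, {points} pt{'s' if points != 1 else ''}")
--     return "\n".join(output)
-- ===== SOURCE B (Python) =====
-- def _bisect_right(a, x):
--     """Rightmost insertion point for x in the sorted list a (binary search)."""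
--     lo, hi = 0, len(a)
--     while lo < hi:
--         mid = (lo + hi) // 2
--         if a[mid] <= x:
--             lo = mid + 1
--         else:
--             hi = mid
--     return lo
--
-- def format_standings(sorted_standings):
--     """Format the standings for output."""
--     pts = [p for _, p in sorted_standings]
--     starts = [i for i in range(len(pts)) if i == 0 or pts[i] != pts[i - 1]]
--     lines = []
--     for i, (team, p) in enumerate(sorted_standings):
--         rank = starts[_bisect_right(starts, i) - 1] + 1
--         lines.append(f"{rank}. {team}, {p} pt{'s' if p != 1 else ''}")
--     return "\n".join(lines)
-- ===== Notes on version B (the rewrite author's own statement) =====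
-- stated objective: alternative
-- what changed: Replaces A's single stateful pass (prev_points/rank tracking) with a staged index-structure approach: first build the list of run-start indices by a pairwise comparison, then look up each element's rank with a hand-rolled binary search over that list.
import Mathlib
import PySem

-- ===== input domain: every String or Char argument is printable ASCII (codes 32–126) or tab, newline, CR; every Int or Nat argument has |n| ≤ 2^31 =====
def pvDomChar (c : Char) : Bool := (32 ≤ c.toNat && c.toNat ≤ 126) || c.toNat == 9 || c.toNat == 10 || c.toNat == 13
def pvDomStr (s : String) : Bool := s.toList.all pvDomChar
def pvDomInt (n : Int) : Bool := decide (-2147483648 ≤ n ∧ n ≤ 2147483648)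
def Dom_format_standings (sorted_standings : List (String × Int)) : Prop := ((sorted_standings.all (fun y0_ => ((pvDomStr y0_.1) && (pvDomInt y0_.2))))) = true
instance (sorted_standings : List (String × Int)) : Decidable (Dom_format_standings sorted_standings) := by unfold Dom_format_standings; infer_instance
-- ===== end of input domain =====

-- B replaces A's single stateful pass (prev_points/rank tracking) with a staged approach: build the
-- list of run-start indices by pairwise comparison, then find each element's rank by binary search
-- over that list (alternative decomposition; not claimed faster).


-- ===== PORT A =====
-- line rank team points = f"{rank}. {team}, {points} pt{'s' if points != 1 else ''}"  (the f-string both Pythons share)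
def fsLine (rank : Int) (team : String) (points : Int) : String :=
  PySem.Int.toStr rank ++ ". " ++ team ++ ", " ++ PySem.Int.toStr points ++ " pt" ++ (if points != 1 then "s" else "")

-- A's loop: index i, running rank and prev_points carried through the recursion; lines consed in order
def fsGoA : List (String × Int) → Int → Int → Option Int → List String
  | [], _, _, _ => []
  | (team, points) :: rest, i, rank, prev =>
    let rank := if some points ≠ prev then i + 1 else rank
    fsLine rank team points :: fsGoA rest (i + 1) rank (some points)

def format_standings (sorted_standings : List (String × Int)) : String :=
  PySem.Str.join "\n" (fsGoA sorted_standings 0 1 none)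

-- ===== PORT B =====
-- Source B's _bisect_right: lo/hi are Python ints that stay ≥ 0, carried as Nat ((lo+hi)//2 = Nat division);
-- a[mid] is always in range in Source B's call, ported as getD (exact there)
def fsBisect (a : List Int) (x : Int) (lo hi : Nat) : Nat :=
  if lo < hi then
    let mid := (lo + hi) / 2
    if a.getD mid 0 ≤ x then fsBisect a x (mid + 1) hi else fsBisect a x lo mid
  else lo
termination_by hi - lo
decreasing_by all_goals omega

-- Source B's starts comprehension: [i for i in range(len(pts)) if i == 0 or pts[i] != pts[i - 1]]
def fsStarts (pts : List Int) : List Int :=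
  (PySem.List.pyRange 0 (PySem.List.len pts) 1).filter
    (fun i => i == 0 || !(PySem.List.pyGetD pts i 0 == PySem.List.pyGetD pts (i - 1) 0))

def format_standings_alt (sorted_standings : List (String × Int)) : String :=
  let pts := sorted_standings.map (fun q => q.2)
  let starts := fsStarts pts
  PySem.Str.join "\n"
    ((PySem.List.enumerate sorted_standings 0).map (fun z =>
      fsLine (PySem.List.pyGetD starts ((fsBisect starts z.1 0 starts.length : Int) - 1) 0 + 1) z.2.1 z.2.2))

-- ===== PRECONDITION & SPEC =====
def Spec_format_standings (sorted_standings : List (String × Int)) (out : String) : Prop := out = format_standings_alt sorted_standings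
instance (sorted_standings : List (String × Int)) (out : String) : Decidable (Spec_format_standings sorted_standings out) := by unfold Spec_format_standings; infer_instance

-- ===== CLAIM (what is proved, stated in full; the proofs are below) =====
def Claim_equal_format_standings : Prop := ∀ (sorted_standings : List (String × Int)), Dom_format_standings sorted_standings → Spec_format_standings sorted_standings (format_standings sorted_standings)

-- ===== LEMMAS AND PROOFS =====

-- proof-side reference: the output run by run; each run of equal points gets rank o+1
def fsRuns : List (String × Int) → Int → List String
  | [], _ => []
  | (team, points) :: rest, o =>
    let run := rest.takeWhile (fun q => q.2 == points)
    fsLine (o + 1) team points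
      :: (run.map (fun q => fsLine (o + 1) q.1 q.2)
          ++ fsRuns (rest.dropWhile (fun q => q.2 == points)) (o + 1 + run.length))
termination_by xs _ => xs.length
decreasing_by simpa using Nat.lt_succ_of_le (List.length_dropWhile_le _ _)

-- proof-side rank: 1 + the largest run start ≤ x (via the count of starts ≤ x)
def rankI (S : List Int) (x : Int) : Int :=
  S.getD (S.countP (fun s => decide (s ≤ x)) - 1) 0 + 1

-- ---- A = fsRuns ----
theorem fsGoA_run (rest : List (String × Int)) : ∀ (i r p : Int),
    fsGoA rest i r (some p)
      = (rest.takeWhile (fun q => q.2 == p)).map (fun q => fsLine r q.1 q.2)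
        ++ fsGoA (rest.dropWhile (fun q => q.2 == p))
            (i + (rest.takeWhile (fun q => q.2 == p)).length) r (some p) := by
  induction rest with
  | nil => intro i r p; simp [fsGoA]
  | cons hd tl ih =>
    intro i r p
    obtain ⟨t, q⟩ := hd
    by_cases h : q = p
    · subst h
      simp only [List.takeWhile_cons, List.dropWhile_cons, beq_self_eq_true, if_true,
        List.map_cons, List.length_cons, fsGoA]
      rw [if_neg (by simp)]
      rw [ih (i + 1) r q]
      have harg : i + 1 + ((tl.takeWhile (fun q' => q'.2 == q)).length : Int)
          = i + (((tl.takeWhile (fun q' => q'.2 == q)).length + 1 : Nat) : Int) := by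
        push_cast; ring
      rw [harg]
      simp
    · simp [h, fsGoA]

theorem head?_dropWhile_false {α : Type} (p : α → Bool) (l : List α) (x : α)
    (h : x ∈ (l.dropWhile p).head?) : p x = false := by
  induction l with
  | nil => simp at h
  | cons hd tl ih =>
    rw [List.dropWhile_cons] at h
    split at h
    · exact ih h
    · simp_all

theorem fsGoA_fresh (n : Nat) : ∀ (xs : List (String × Int)), xs.length ≤ n →
    ∀ (i r : Int) (prev : Option Int),
    (∀ hd ∈ xs.head?, prev ≠ some hd.2) →
    fsGoA xs i r prev = fsRuns xs i := by
  induction n with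
  | zero =>
    intro xs hlen
    rw [List.length_eq_zero_iff.mp (Nat.le_zero.mp hlen)]
    intro _ _ _ _; simp [fsGoA, fsRuns]
  | succ n ih =>
    intro xs hlen i r prev hfresh
    match xs with
    | [] => simp [fsGoA, fsRuns]
    | (team, points) :: rest =>
      have hne : some points ≠ prev := by
        have := hfresh (team, points) (by simp)
        exact fun h => this h.symm
      rw [fsRuns]
      simp only [fsGoA, if_pos hne]
      rw [fsGoA_run rest (i + 1) (i + 1) points]
      congr 1
      congr 1
      exact ih _ (le_trans (List.length_dropWhile_le _ _) (Nat.le_of_succ_le_succ hlen)) _ _ _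
        (by
          intro hd hhd
          have hfalse : (fun q : String × Int => q.2 == points) hd = false :=
            head?_dropWhile_false _ _ hd hhd
          simp only [beq_eq_false_iff_ne, ne_eq] at hfalse
          exact fun he => hfalse ((Option.some.injEq _ _ ▸ he : points = hd.2)).symm)

-- ---- facts about fsStarts ----






-- decomposition of fsStarts at the first run


-- ---- binary search = countP ----




-- ---- rank facts on the decomposed starts list ----





-- ---- facts about fsStarts ----
theorem fsStarts_nonneg (pts : List Int) : ∀ s ∈ fsStarts pts, 0 ≤ s := by
  intro s hs
  have := (List.mem_filter.mp hs).1
  exact (PySem.List.mem_pyRange_one.mp this).1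

theorem fsStarts_pairwise (pts : List Int) : (fsStarts pts).Pairwise (· < ·) :=
  (PySem.List.pairwise_lt_pyRange_one 0 _).filter _

theorem fsStarts_zero_mem (pts : List Int) (h : pts ≠ []) : (0 : Int) ∈ fsStarts pts := by
  apply List.mem_filter.mpr
  constructor
  · exact PySem.List.mem_pyRange_one.mpr ⟨le_refl 0, by simp [PySem.List.len_eq]; exact List.length_pos_iff.mpr h⟩
  · simp

def natStarts (pts : List Int) : List Nat :=
  (List.range pts.length).filter (fun k => k == 0 || !(pts.getD k 0 == pts.getD (k-1) 0))

theorem fsStarts_eq_natView (pts : List Int) :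
    fsStarts pts = (natStarts pts).map (Nat.cast : Nat → Int) := by
  unfold natStarts
  unfold fsStarts
  rw [PySem.List.len_eq, PySem.List.pyRange_one]
  simp only [zero_add, Int.sub_zero, Int.toNat_natCast]
  rw [List.filter_map]
  refine congrArg (List.map _) (List.filter_congr ?_)
  intro k _
  simp only [Function.comp]
  match k with
  | 0 => simp
  | (j+1) =>
    have h1 : ((j+1 : Nat) : Int) - 1 = (j : Int) := by push_cast; ring
    simp only [h1, PySem.List.pyGetD_natCast]
    have hne : ¬ ((j:Int) + 1 = 0) := by omega
    simp [hne]

theorem natStarts_decomp (p : Int) (rs ts : List Int)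
    (hrs : ∀ q ∈ rs, q = p) (hts : ∀ q ∈ ts.head?, q ≠ p) :
    natStarts (p :: rs ++ ts) = 0 :: (natStarts ts).map (· + (rs.length + 1)) := by
  have hval : ∀ k, k ≤ rs.length → (p :: rs ++ ts).getD k 0 = p := by
    intro k hk
    match k with
    | 0 => rfl
    | (j+1) =>
      have hj : j < rs.length := by omega
      show (rs ++ ts).getD j 0 = p
      rw [List.getD_append _ _ _ _ hj, List.getD_eq_getElem _ _ hj]
      exact hrs _ (List.getElem_mem hj)
  have hlen : (p :: rs ++ ts).length = (rs.length + 1) + ts.length := by simp; omega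
  have hgetr : ∀ j, (p :: rs ++ ts).getD (rs.length + 1 + j) 0 = ts.getD j 0 := by
    intro j
    have : (p :: rs ++ ts) = (p :: rs) ++ ts := by simp
    rw [this, List.getD_append_right _ _ _ _ (by simp only [List.length_cons]; omega)]
    congr 1
    simp only [List.length_cons]
    omega
  unfold natStarts
  rw [hlen, List.range_add, List.filter_append]
  have part1 : (List.range (rs.length + 1)).filter
      (fun k => k == 0 || !((p :: rs ++ ts).getD k 0 == (p :: rs ++ ts).getD (k-1) 0)) = [0] := by
    rw [List.range_succ_eq_map, List.filter_cons]
    simp only [show ((0:Nat) == 0 || !((p :: rs ++ ts).getD 0 0 == (p :: rs ++ ts).getD (0-1) 0)) = true by simp]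
    rw [List.filter_map]
    have : (List.range rs.length).filter
        ((fun k => k == 0 || !((p :: rs ++ ts).getD k 0 == (p :: rs ++ ts).getD (k-1) 0)) ∘ Nat.succ) = [] := by
      apply List.filter_eq_nil_iff.mpr
      intro j hj
      have hj' : j < rs.length := List.mem_range.mp hj
      simp only [Function.comp]
      have e1 : (p :: rs ++ ts).getD (j+1) 0 = p := hval (j+1) (by omega)
      simp only [Nat.succ_eq_add_one, Nat.add_sub_cancel]
      rw [e1, hval j (by omega)]
      simp
    rw [this]; rfl
  rw [part1]
  rw [List.filter_map]
  have hcond : ∀ j ∈ List.range ts.length,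
      ((fun k => k == 0 || !((p :: rs ++ ts).getD k 0 == (p :: rs ++ ts).getD (k-1) 0)) ∘ (fun x => rs.length + 1 + x)) j
      = (fun k => k == 0 || !(ts.getD k 0 == ts.getD (k-1) 0)) j := by
    intro j hj
    have hjlt : j < ts.length := List.mem_range.mp hj
    simp only [Function.comp]
    match j with
    | 0 =>
      have hts' : ts.getD 0 0 ≠ p := by
        match ts, hjlt with
        | (h :: t), _ => exact hts h rfl
      rw [show rs.length + 1 + 0 - 1 = rs.length by omega, hval rs.length le_rfl, hgetr 0]
      simp
      exact hts'
    | (i+1) =>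
      rw [show rs.length + 1 + (i+1) - 1 = rs.length + 1 + i by omega, hgetr (i+1), hgetr i]
      simp
  rw [List.filter_congr hcond]
  simp only [List.singleton_append]
  congr 1
  apply List.map_congr_left
  intro j _; omega

theorem fsStarts_decomp (p : Int) (rs ts : List Int)
    (hrs : ∀ q ∈ rs, q = p) (hts : ∀ q ∈ ts.head?, q ≠ p) :
    fsStarts (p :: rs ++ ts) = 0 :: (fsStarts ts).map (· + ((rs.length : Int) + 1)) := by
  rw [fsStarts_eq_natView, natStarts_decomp p rs ts hrs hts, fsStarts_eq_natView]
  simp only [List.map_cons, List.map_map, Nat.cast_zero]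
  congr 1

-- ---- binary search = countP ----
theorem countP_eq_of_split (a : List Int) (p : Int → Bool) (lo : Nat) (hlo : lo ≤ a.length)
    (h1 : ∀ j, j < lo → p (a.getD j 0) = true)
    (h2 : ∀ j, lo ≤ j → j < a.length → p (a.getD j 0) = false) :
    a.countP p = lo := by
  have hsplit : a = a.take lo ++ a.drop lo := (List.take_append_drop lo a).symm
  rw [hsplit, List.countP_append]
  have ht : (a.take lo).countP p = lo := by
    rw [List.countP_eq_length.mpr, List.length_take_of_le hlo]
    intro y hy
    obtain ⟨i, hi, hy⟩ := List.mem_iff_getElem.mp hy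
    have hil : i < lo := by simpa [List.length_take, hlo] using hi
    have : y = a.getD i 0 := by
      rw [List.getD_eq_getElem _ _ (by omega), ← hy, List.getElem_take]
    rw [this]; exact h1 i hil
  have hd : (a.drop lo).countP p = 0 := by
    rw [List.countP_eq_zero]
    intro y hy
    obtain ⟨i, hi, hy⟩ := List.mem_iff_getElem.mp hy
    have hil : lo + i < a.length := by simp [List.length_drop] at hi; omega
    have : y = a.getD (lo + i) 0 := by
      rw [List.getD_eq_getElem _ _ hil, ← hy, List.getElem_drop]
    rw [this]
    exact Bool.eq_false_iff.mp (h2 (lo + i) (by omega) hil) ∘ Eq.symm ∘ Eq.symm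
  omega

theorem fsBisect_eq_countP_aux (a : List Int) (x : Int)
    (hmono : ∀ j k, j ≤ k → k < a.length → a.getD j 0 ≤ a.getD k 0) :
    ∀ (n lo hi : Nat), hi - lo ≤ n → lo ≤ hi → hi ≤ a.length →
      (∀ j, j < lo → a.getD j 0 ≤ x) →
      (∀ j, hi ≤ j → j < a.length → x < a.getD j 0) →
      fsBisect a x lo hi = a.countP (fun v => decide (v ≤ x)) := by
  intro n
  induction n with
  | zero =>
    intro lo hi hn hle hhi h1 h2
    have : hi = lo := by omega
    subst this
    rw [fsBisect, if_neg (by omega)]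
    exact (countP_eq_of_split a _ hi (by omega)
      (fun j hj => by simpa using h1 j hj)
      (fun j hj hjl => by simp only [decide_eq_false_iff_not]; exact not_le.mpr (h2 j hj hjl))).symm
  | succ n ih =>
    intro lo hi hn hle hhi h1 h2
    by_cases hlt : lo < hi
    · rw [fsBisect, if_pos hlt]
      have hmid1 : lo ≤ (lo + hi) / 2 := by omega
      have hmid2 : (lo + hi) / 2 < hi := by omega
      by_cases hc : a.getD ((lo + hi) / 2) 0 ≤ x
      · rw [if_pos hc]
        exact ih ((lo + hi) / 2 + 1) hi (by omega) (by omega) hhi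
          (fun j hj => le_trans (hmono j ((lo + hi) / 2) (by omega) (by omega)) hc) h2
      · rw [if_neg hc]
        exact ih lo ((lo + hi) / 2) (by omega) (by omega) (by omega) h1
          (fun j hj hjl => lt_of_lt_of_le (not_le.mp hc) (hmono ((lo + hi) / 2) j hj hjl))
    · rw [fsBisect, if_neg hlt]
      have : hi = lo := by omega
      subst this
      exact (countP_eq_of_split a _ hi (by omega)
        (fun j hj => by simpa using h1 j hj)
        (fun j hj hjl => by simp only [decide_eq_false_iff_not]; exact not_le.mpr (h2 j hj hjl))).symm

theorem fsBisect_eq_countP (a : List Int) (x : Int)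
    (hmono : ∀ j k, j ≤ k → k < a.length → a.getD j 0 ≤ a.getD k 0) :
    fsBisect a x 0 a.length = a.countP (fun v => decide (v ≤ x)) :=
  fsBisect_eq_countP_aux a x hmono a.length 0 a.length (by omega) (by omega) le_rfl
    (by omega) (fun j hj hjl => by omega)

-- ---- rank on the decomposed starts list ----
theorem rankI_first (S' : List Int) (c : Int)     (hnn : ∀ s ∈ S', 0 ≤ s) (x : Int) (hx0 : 0 ≤ x) (hxc : x < c) :
    rankI (0 :: S'.map (· + c)) x = 1 := by
  unfold rankI
  have h0 : (fun s => decide (s ≤ x)) (0 : Int) = true := by simp [hx0]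
  have hzero : (S'.map (· + c)).countP (fun s => decide (s ≤ x)) = 0 := by
    rw [List.countP_map]
    apply List.countP_eq_zero.mpr
    intro s hs
    have := hnn s hs
    simp only [Function.comp_apply, decide_eq_true_eq]
    omega
  rw [List.countP_cons, hzero]
  simp [h0]

theorem rankI_shift (S' : List Int) (c : Int) (hc : 0 < c) (h0 : (0 : Int) ∈ S')
    (j : Int) (hj : 0 ≤ j) :
    rankI (0 :: S'.map (· + c)) (c + j) = c + rankI S' j := by
  unfold rankI
  have hcnt : (S'.map (· + c)).countP (fun s => decide (s ≤ c + j))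
      = S'.countP (fun s => decide (s ≤ j)) := by
    rw [List.countP_map]
    apply List.countP_congr
    intro s _
    simp only [Function.comp_apply, decide_eq_true_eq]
    omega
  have hpos : 0 < S'.countP (fun s => decide (s ≤ j)) :=
    List.countP_pos_iff.mpr ⟨0, h0, by simpa using hj⟩
  have hle : S'.countP (fun s => decide (s ≤ j)) ≤ S'.length := List.countP_le_length
  set cnt := S'.countP (fun s => decide (s ≤ j)) with hcntdef
  rw [List.countP_cons, hcnt]
  rw [if_pos (show decide ((0:Int) ≤ c + j) = true by simp; omega)]
  have hidx : cnt + 1 - 1 = cnt := by omega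
  rw [hidx]
  have : (0 :: S'.map (· + c)).getD cnt 0 = (S'.map (· + c)).getD (cnt - 1) 0 := by
    match cnt, hpos with
    | (m+1), _ => simp
  rw [this]
  have hm : cnt - 1 < S'.length := by omega
  rw [List.getD_eq_getElem _ _ (by simpa using hm), List.getElem_map,
      List.getD_eq_getElem _ _ hm]
  ring

-- ---- fsRuns = rank-indexed map ----
theorem fsRuns_eq_map (n : Nat) : ∀ (xs : List (String × Int)), xs.length ≤ n → ∀ (o s : Int),
    fsRuns xs o = (PySem.List.enumerate xs s).map (fun z =>
      fsLine (o + rankI (fsStarts (xs.map (fun q => q.2))) (z.1 - s)) z.2.1 z.2.2) := by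
  induction n with
  | zero =>
    intro xs hlen
    rw [List.length_eq_zero_iff.mp (Nat.le_zero.mp hlen)]
    intro o s
    simp [fsRuns, PySem.List.enumerate]
  | succ n ih =>
    intro xs hlen o s
    match xs with
    | [] => simp [fsRuns, PySem.List.enumerate]
    | (t, p) :: rest =>
      set run := rest.takeWhile (fun q => q.2 == p) with hrun
      set rest' := rest.dropWhile (fun q => q.2 == p) with hrest'
      set c : Int := (run.length : Int) + 1 with hc
      set S' := fsStarts (rest'.map (fun q => q.2)) with hS'
      have hcpos : 0 < c := by positivity
      have hsplit : rest = run ++ rest' := (List.takeWhile_append_dropWhile).symm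
      have hmapsnd : ((t, p) :: rest).map (fun q => q.2)
          = p :: run.map (fun q => q.2) ++ rest'.map (fun q => q.2) := by
        rw [List.map_cons]
        show p :: rest.map (fun q => q.2) = p :: (run.map (fun q => q.2) ++ rest'.map (fun q => q.2))
        rw [hsplit, List.map_append]
      have hST : fsStarts (((t, p) :: rest).map (fun q => q.2)) = 0 :: S'.map (· + c) := by
        rw [hmapsnd, fsStarts_decomp p (run.map (fun q => q.2)) (rest'.map (fun q => q.2))
          (by
            intro q hq
            obtain ⟨w, hw, rfl⟩ := List.mem_map.mp hq
            have := List.mem_takeWhile_imp (hrun ▸ hw)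
            exact beq_iff_eq.mp this)
          (by
            intro q hq
            rw [List.head?_map] at hq
            obtain ⟨w, hw, rfl⟩ := Option.mem_map.mp hq
            have := head?_dropWhile_false (fun q => q.2 == p) rest w (hrest' ▸ hw)
            exact beq_eq_false_iff_ne.mp this)]
        rw [List.length_map]
      have hnn' : ∀ v ∈ S', 0 ≤ v := fsStarts_nonneg _
      have henum : PySem.List.enumerate rest (s + 1)
          = PySem.List.enumerate run (s + 1) ++ PySem.List.enumerate rest' (s + 1 + (run.length : Int)) := by
        conv_lhs => rw [hsplit]
        rw [PySem.List.enumerate_append]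
      have hhead : fsLine (o + rankI (0 :: S'.map (· + c)) (s - s)) t p = fsLine (o + 1) t p := by
        rw [sub_self, rankI_first S' c hnn' 0 le_rfl hcpos]
      have hmid : (PySem.List.enumerate run (s + 1)).map
          (fun z => fsLine (o + rankI (0 :: S'.map (· + c)) (z.1 - s)) z.2.1 z.2.2)
          = run.map (fun q => fsLine (o + 1) q.1 q.2) := by
        rw [List.map_congr_left (g := fun z : Int × String × Int => fsLine (o + 1) z.2.1 z.2.2)
          (by
            intro z hz
            obtain ⟨k, hk, rfl⟩ := (PySem.List.mem_enumerate_iff _ _ _).mp hz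
            show fsLine (o + rankI (0 :: S'.map (· + c)) ((s + 1 + (k : Int)) - s)) _ _ = _
            rw [show (s + 1 + (k : Int)) - s = 1 + (k : Int) by ring,
              rankI_first S' c hnn' (1 + (k : Int)) (by omega) (by rw [hc]; omega)])]
        rw [show (fun z : Int × String × Int => fsLine (o + 1) z.2.1 z.2.2)
            = (fun q : String × Int => fsLine (o + 1) q.1 q.2) ∘ (fun z : Int × String × Int => z.2) from rfl,
          ← List.map_map, PySem.List.map_snd_enumerate]
      have htail : (PySem.List.enumerate rest' (s + 1 + (run.length : Int))).map
          (fun z => fsLine (o + rankI (0 :: S'.map (· + c)) (z.1 - s)) z.2.1 z.2.2)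
          = fsRuns rest' (o + 1 + (run.length : Int)) := by
        by_cases hre : rest' = []
        · rw [hre]; simp [fsRuns, PySem.List.enumerate]
        · have h0S : (0 : Int) ∈ S' := fsStarts_zero_mem _ (by simpa using hre)
          have hlen' : rest'.length ≤ n := by
            have h1 : rest'.length ≤ rest.length := hrest' ▸ List.length_dropWhile_le _ _
            have h2 : rest.length + 1 ≤ n + 1 := by simpa using hlen
            omega
          rw [ih rest' hlen' (o + 1 + (run.length : Int)) (s + 1 + (run.length : Int))]
          apply List.map_congr_left
          intro z hz
          obtain ⟨k, hk, rfl⟩ := (PySem.List.mem_enumerate_iff _ _ _).mp hz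
          show fsLine (o + rankI (0 :: S'.map (· + c)) ((s + 1 + (run.length : Int) + (k : Int)) - s)) _ _ = _
          rw [show (s + 1 + (run.length : Int) + (k : Int)) - s = c + (k : Int) by rw [hc]; ring,
            rankI_shift S' c hcpos h0S (k : Int) (by omega),
            show (s + 1 + (run.length : Int) + (k : Int)) - (s + 1 + (run.length : Int)) = (k : Int) by ring,
            show c + rankI S' (k : Int) = rankI S' (k : Int) + c by ring, hc]
          show fsLine (o + (rankI S' (k : Int) + ((run.length : Int) + 1))) _ _
            = fsLine ((o + 1 + (run.length : Int)) + rankI S' (k : Int)) _ _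
          congr 1
          ring
      rw [fsRuns, ← hrun, ← hrest', PySem.List.enumerate_cons, henum, List.map_cons, List.map_append, hST]
      congr 1
      · exact hhead.symm
      · rw [hmid, htail]

theorem getD_mono_of_pairwise_lt (l : List Int) (hp : l.Pairwise (· < ·)) :
    ∀ j k, j ≤ k → k < l.length → l.getD j 0 ≤ l.getD k 0 := by
  intro j k hjk hk
  rcases eq_or_lt_of_le hjk with rfl | hlt
  · exact le_refl _
  · rw [List.getD_eq_getElem _ _ (by omega), List.getD_eq_getElem _ _ hk]
    exact le_of_lt ((List.pairwise_iff_getElem.mp hp) j k (by omega) hk hlt)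

-- ===== VERDICT (by name: the statement is the Claim_ definition above) =====
theorem format_standings_spec : Claim_equal_format_standings := by
  intro xs _
  unfold Spec_format_standings format_standings format_standings_alt
  rw [fsGoA_fresh xs.length xs le_rfl 0 1 none (by simp)]
  show PySem.Str.join "\n" (fsRuns xs 0)
    = PySem.Str.join "\n" ((PySem.List.enumerate xs 0).map (fun z =>
        fsLine (PySem.List.pyGetD (fsStarts (xs.map (fun q => q.2)))
          ((fsBisect (fsStarts (xs.map (fun q => q.2))) z.1 0 (fsStarts (xs.map (fun q => q.2))).length : Int) - 1) 0 + 1)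
          z.2.1 z.2.2))
  congr 1
  rw [fsRuns_eq_map xs.length xs le_rfl 0 0]
  apply List.map_congr_left
  intro z hz
  obtain ⟨k, hk, rfl⟩ := (PySem.List.mem_enumerate_iff _ _ _).mp hz
  set ST := fsStarts (xs.map (fun q => q.2)) with hSTdef
  have hmono := getD_mono_of_pairwise_lt ST (fsStarts_pairwise _)
  have h0mem : (0 : Int) ∈ ST := fsStarts_zero_mem _ (by
    intro hnil
    rw [List.map_eq_nil_iff] at hnil
    subst hnil
    simp at hk)
  rw [fsBisect_eq_countP ST ((0 : Int) + (k : Int)) hmono]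
  have hpos : 0 < ST.countP (fun v => decide (v ≤ (0 : Int) + (k : Int))) :=
    List.countP_pos_iff.mpr ⟨0, h0mem, by simp⟩
  rw [show ((ST.countP (fun v => decide (v ≤ (0 : Int) + (k : Int))) : Int) - 1)
      = ((ST.countP (fun v => decide (v ≤ (0 : Int) + (k : Int))) - 1 : Nat) : Int) by omega,
    PySem.List.pyGetD_natCast]
  show fsLine (0 + rankI ST ((0 : Int) + (k : Int) - 0)) _ _ = _
  rw [show (0 : Int) + (k : Int) - 0 = (0 : Int) + (k : Int) by ring]
  unfold rankI
  congr 1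
  ring
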